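-- pv_equiv track=rewrite | github.com/Wendystar0628/Circuit-Design-AI-Assistant | domain/simulation/executor/spice_executor.py | _is_critical_error
-- ===== SOURCE A (Python) =====
-- def _is_critical_error(output: str) -> bool:
--     """
--     检查是否是需要重新初始化的严重错误
--
--     Args:
--         output: ngspice 输出
--
--     Returns:
--         bool: 是否是严重错误
--     """
--     critical_patterns = [
--         "cannot recover",
--         "awaits to be detached",
--         "fatal error",
--         "segmentation fault",
--         "access violation",
--         "internal error",
--     ]
--     output_lower = output.lower()
--     return any(pattern in output_lower for pattern in critical_patterns)
-- ===== SOURCE B (Python) =====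
-- _CRITICAL_PATTERNS = (
--     "cannot recover",
--     "awaits to be detached",
--     "fatal error",
--     "segmentation fault",
--     "access violation",
--     "internal error",
-- )
--
--
-- def _is_critical_error(output: str) -> bool:
--     """Single left-to-right scan: at each position, try to match one of the
--     critical phrases case-insensitively; no full lowered copy, no six
--     independent substring searches."""
--     n = len(output)
--     for i in range(n):
--         for p in _CRITICAL_PATTERNS:
--             if i + len(p) <= n and output[i:i + len(p)].lower() == p:
--                 return True
--     return False
-- ===== Notes on version B (the rewrite author's own statement) =====
-- stated objective: alternative
-- what changed: Instead of lowercasing the whole string and running six independent substring scans, B makes a single left-to-right scan over positions and at each position tries a case-insensitive match of each critical phrase, returning on the first hit.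
import Mathlib
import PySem

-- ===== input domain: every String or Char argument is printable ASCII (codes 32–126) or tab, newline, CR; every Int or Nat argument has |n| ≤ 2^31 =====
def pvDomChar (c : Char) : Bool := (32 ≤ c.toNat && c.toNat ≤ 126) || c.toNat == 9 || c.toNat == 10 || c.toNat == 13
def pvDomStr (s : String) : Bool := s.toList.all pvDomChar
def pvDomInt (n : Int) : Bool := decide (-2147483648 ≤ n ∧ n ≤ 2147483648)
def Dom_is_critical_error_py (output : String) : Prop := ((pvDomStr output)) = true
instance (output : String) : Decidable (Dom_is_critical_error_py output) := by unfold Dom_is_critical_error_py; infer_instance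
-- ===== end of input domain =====

-- B replaces "lowercase the whole output, then six independent substring scans" by a single
-- left-to-right scan that tries a case-insensitive match of each phrase at each position
-- (objective: alternative traversal, same result).

-- ===== PORT A =====
def pvCriticalPatterns : List String :=
  ["cannot recover", "awaits to be detached", "fatal error",
   "segmentation fault", "access violation", "internal error"]

-- A: output_lower = output.lower(); any(pattern in output_lower for pattern in critical_patterns)
def is_critical_error_py (output : String) : Bool :=
  let output_lower := PySem.Str.lower output
  pvCriticalPatterns.any (fun pattern => PySem.Str.isIn pattern output_lower)

-- ===== PORT B =====
def pvPatsB : List (List Char) :=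
  ["cannot recover".toList, "awaits to be detached".toList, "fatal error".toList,
   "segmentation fault".toList, "access violation".toList, "internal error".toList]

-- B's inner test at position i, on the suffix t = output[i:]:
-- 'i + len(p) <= n and output[i:i+len(p)].lower() == p'  (the slice is t.take p.length)
def pvMatchAt (t p : List Char) : Bool :=
  decide (p.length ≤ t.length) && (PySem.Chars.lower (t.take p.length) == p)

-- B's outer loop 'for i in range(n)', transcribed as recursion over the suffixes of the input
def pvScanB : List Char → Bool
  | [] => false
  | c :: rest => pvPatsB.any (fun p => pvMatchAt (c :: rest) p) || pvScanB rest

def is_critical_error_py_alt (output : String) : Bool := pvScanB output.toList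

-- ===== PRECONDITION & SPEC =====
def Spec_is_critical_error_py (output : String) (out : Bool) : Prop := out = is_critical_error_py_alt output
instance (output : String) (out : Bool) : Decidable (Spec_is_critical_error_py output out) := by unfold Spec_is_critical_error_py; infer_instance

-- ===== CLAIM (what is proved, stated in full; the proofs are below) =====
def Claim_equal_is_critical_error_py : Prop := ∀ (output : String), Dom_is_critical_error_py output → Spec_is_critical_error_py output (is_critical_error_py output)

-- ===== LEMMAS AND PROOFS =====

-- B's positional test is exactly "p is a prefix of the lowered suffix"
theorem pvMatchAt_iff (t p : List Char) :
    pvMatchAt t p = true ↔ p <+: PySem.Chars.lower t := by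
  simp only [pvMatchAt, Bool.and_eq_true, decide_eq_true_eq, beq_iff_eq, PySem.Chars.lower]
  rw [List.prefix_iff_eq_take]
  constructor
  · rintro ⟨h1, h2⟩
    rw [← List.map_take]
    exact h2.symm
  · intro h
    have hl : p.length ≤ t.length := by
      rw [h]; simp
    exact ⟨hl, by rw [List.map_take]; exact h.symm⟩

-- "p occurs somewhere in lower(l)" = "some nonempty suffix of l matches p at its head"
theorem pvKey (p : List Char) (hp : p ≠ []) (l : List Char) :
    (∃ t, t <:+ l ∧ t ≠ [] ∧ pvMatchAt t p = true) ↔ p <:+: PySem.Chars.lower l := by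
  constructor
  · rintro ⟨t, hs, -, hm⟩
    exact ((pvMatchAt_iff t p).mp hm).isInfix.trans ((hs.map _).isInfix)
  · intro h
    obtain ⟨s, hps, hsl⟩ := List.infix_iff_prefix_suffix.mp h
    rw [show PySem.Chars.lower l = l.map PySem.Chars.lowerChar from rfl,
        List.suffix_map_iff] at hsl
    obtain ⟨t, htl, rfl⟩ := hsl
    refine ⟨t, htl, ?_, (pvMatchAt_iff t p).mpr hps⟩
    rintro rfl
    simp only [List.map_nil, List.prefix_nil] at hps
    exact hp hps

-- characterisation of B's scan
theorem pvScanB_iff (l : List Char) :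
    pvScanB l = true ↔
      ∃ t, t <:+ l ∧ t ≠ [] ∧ pvPatsB.any (fun p => pvMatchAt t p) = true := by
  induction l with
  | nil => simp [pvScanB]
  | cons c rest ih =>
    simp only [pvScanB, Bool.or_eq_true, ih]
    constructor
    · rintro (h | ⟨t, ht, hne, hm⟩)
      · exact ⟨c :: rest, List.suffix_refl _, by simp, h⟩
      · exact ⟨t, ht.trans (List.suffix_cons c rest), hne, hm⟩
    · rintro ⟨t, ht, hne, hm⟩
      rcases List.suffix_cons_iff.mp ht with rfl | ht'
      · exact Or.inl hm
      · exact Or.inr ⟨t, ht', hne, hm⟩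

-- ===== VERDICT (by name: the statement is the Claim_ definition above) =====
theorem is_critical_error_py_spec : Claim_equal_is_critical_error_py := by
  intro output _
  unfold Spec_is_critical_error_py
  apply Bool.coe_iff_coe.mp
  simp only [is_critical_error_py, is_critical_error_py_alt, pvCriticalPatterns, pvPatsB,
    List.any_cons, List.any_nil, Bool.or_eq_true, Bool.false_eq_true, or_false,
    PySem.Str.isIn_iff_infix, PySem.Str.toList_lower, pvScanB_iff]
  simp only [and_or_left, exists_or]
  rw [pvKey _ (by decide), pvKey _ (by decide), pvKey _ (by decide),
      pvKey _ (by decide), pvKey _ (by decide), pvKey _ (by decide)]
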